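-- pv_equiv track=rewrite | github.com/BBaloglu/ASHURE | src/bilge_pype.py | find_endgap
-- ===== SOURCE A (Python) =====
-- def find_endgap(seq):
--     s1 = -1
--     s2 = -1
--     for i in range(0,len(seq)):
--         if seq[i]!='-' and s1 == -1:
--             s1 = i
--         if seq[len(seq)-i-1]!='-' and s2 == -1:
--             s2 = len(seq)-i
--         if s1 != -1 and s2 != -1:
--             break
--     return [s1,s2]
-- ===== SOURCE B (Python) =====
-- def find_endgap(seq):
--     idx = [i for i in range(len(seq)) if seq[i] != '-']
--     if not idx:
--         return [-1, -1]
--     return [idx[0], idx[-1] + 1]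
-- ===== Notes on version B (the rewrite author's own statement) =====
-- stated objective: simpler
-- what changed: Replaces the converging two-pointer scan with early break by a single comprehension collecting all non-gap indices and returning its first element and last element plus one.
import Mathlib
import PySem

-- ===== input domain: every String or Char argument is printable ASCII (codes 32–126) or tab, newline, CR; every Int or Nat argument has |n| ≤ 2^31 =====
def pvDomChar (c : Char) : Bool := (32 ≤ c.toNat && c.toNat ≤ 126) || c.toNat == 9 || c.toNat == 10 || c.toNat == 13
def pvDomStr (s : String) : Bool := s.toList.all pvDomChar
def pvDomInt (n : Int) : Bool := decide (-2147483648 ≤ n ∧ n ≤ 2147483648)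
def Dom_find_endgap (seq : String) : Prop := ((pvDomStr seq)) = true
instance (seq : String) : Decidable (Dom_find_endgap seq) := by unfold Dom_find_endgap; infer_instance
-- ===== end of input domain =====

-- B builds the list of all non-gap indices in one pass and returns its first element
-- and its last element plus one, instead of A's converging two-pointer scan with early break.

-- ===== PORT A =====
-- the for-loop with its break: state (s1, s2), counter i
def fe_loop (cs : List Char) (i : Nat) (s1 s2 : Int) : Int × Int :=
  if _h : i < cs.length then
    let s1' := if PySem.List.pyGetD cs (i : Int) ' ' ≠ '-' ∧ s1 = -1 then (i : Int) else s1
    let s2' := if PySem.List.pyGetD cs ((cs.length : Int) - i - 1) ' ' ≠ '-' ∧ s2 = -1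
               then (cs.length : Int) - i else s2
    if s1' ≠ -1 ∧ s2' ≠ -1 then (s1', s2') else fe_loop cs (i + 1) s1' s2'
  else (s1, s2)
termination_by cs.length - i

def find_endgap (seq : String) : List Int :=
  [(fe_loop seq.toList 0 (-1) (-1)).1, (fe_loop seq.toList 0 (-1) (-1)).2]

-- ===== PORT B =====
-- 'return [-1,-1] if idx is empty else [idx[0], idx[-1] + 1]'
def fe_select (idx : List Int) : List Int :=
  match idx with
  | [] => [-1, -1]
  | a :: _ => [a, PySem.List.pyGetD idx (-1) 0 + 1]

def find_endgap_alt (seq : String) : List Int :=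
  fe_select ((PySem.List.pyRange 0 (PySem.List.len seq.toList) 1).filter
      (fun i => PySem.List.pyGetD seq.toList i ' ' != '-'))

-- ===== PRECONDITION & SPEC =====
def Spec_find_endgap (seq : String) (out : List Int) : Prop := out = find_endgap_alt seq
instance (seq : String) (out : List Int) : Decidable (Spec_find_endgap seq out) := by unfold Spec_find_endgap; infer_instance

-- ===== CLAIM (what is proved, stated in full; the proofs are below) =====
def Claim_equal_find_endgap : Prop := ∀ (seq : String), Dom_find_endgap seq → Spec_find_endgap seq (find_endgap seq)

-- ===== LEMMAS AND PROOFS =====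

-- all characters are gaps: the loop never sets s1 or s2
lemma fe_loop_none (cs : List Char) (h : ∀ j, j < cs.length → cs.getD j ' ' = '-') :
    ∀ k i, cs.length - i ≤ k → fe_loop cs i (-1) (-1) = (-1, -1) := by
  intro k
  induction k with
  | zero =>
    intro i hk
    rw [fe_loop, dif_neg (by omega)]
  | succ k ih =>
    intro i hk
    by_cases hi : i < cs.length
    · rw [fe_loop, dif_pos hi]
      have h1 : PySem.List.pyGetD cs (i : Int) ' ' = '-' := by
        simpa using h i hi
      have h2 : PySem.List.pyGetD cs ((cs.length : Int) - i - 1) ' ' = '-' := by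
        have hc : (cs.length : Int) - i - 1 = ((cs.length - i - 1 : Nat) : Int) := by omega
        rw [hc, PySem.List.pyGetD_natCast]
        simpa using h (cs.length - i - 1) (by omega)
      simp only [h1, h2, ne_eq, not_true_eq_false, false_and, if_false, and_self]
      exact ih (i + 1) (by omega)
    · rw [fe_loop, dif_neg hi]

-- F is the first non-gap index, L the last: the loop returns (F, L + 1)
lemma fe_loop_found (cs : List Char) (F L : Nat)
    (hFn : F < cs.length) (hLn : L < cs.length)
    (hF : cs.getD F ' ' ≠ '-') (hL : cs.getD L ' ' ≠ '-')
    (hFmin : ∀ j, j < F → cs.getD j ' ' = '-')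
    (hLmax : ∀ j, L < j → j < cs.length → cs.getD j ' ' = '-') :
    ∀ k i, cs.length - i ≤ k → i ≤ cs.length →
      fe_loop cs i (if F < i then (F : Int) else -1)
        (if cs.length - 1 - L < i then (L : Int) + 1 else -1) = ((F : Int), (L : Int) + 1) := by
  intro k
  induction k with
  | zero =>
    intro i h1 h2
    have hi : i = cs.length := by omega
    subst hi
    rw [fe_loop, dif_neg (by omega), if_pos hFn, if_pos (by omega)]
  | succ k ih =>
    intro i h1 h2
    by_cases hi : i < cs.length
    · rw [fe_loop, dif_pos hi]
      have e1 : (if PySem.List.pyGetD cs (i : Int) ' ' ≠ '-' ∧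
            (if F < i then (F : Int) else -1) = -1 then (i : Int)
            else (if F < i then (F : Int) else -1)) = (if F < i + 1 then (F : Int) else -1) := by
        rcases Nat.lt_trichotomy F i with hc | hc | hc
        · rw [if_pos hc, if_neg (fun h => absurd h.2 (by omega)),
            if_pos (show F < i + 1 by omega)]
        · subst hc
          have hpg : PySem.List.pyGetD cs (F : Int) ' ' ≠ '-' := by
            rw [PySem.List.pyGetD_natCast]; exact hF
          rw [if_neg (show ¬ F < F by omega), if_pos ⟨hpg, rfl⟩,
            if_pos (show F < F + 1 by omega)]
        · have hpg : PySem.List.pyGetD cs (i : Int) ' ' = '-' := by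
            rw [PySem.List.pyGetD_natCast]; exact hFmin i hc
          rw [if_neg (show ¬ F < i by omega), if_neg (fun h => absurd hpg h.1),
            if_neg (show ¬ F < i + 1 by omega)]
      have hcast : (cs.length : Int) - i - 1 = ((cs.length - i - 1 : Nat) : Int) := by omega
      have e2 : (if PySem.List.pyGetD cs ((cs.length : Int) - i - 1) ' ' ≠ '-' ∧
            (if cs.length - 1 - L < i then (L : Int) + 1 else -1) = -1 then (cs.length : Int) - i
            else (if cs.length - 1 - L < i then (L : Int) + 1 else -1)) =
            (if cs.length - 1 - L < i + 1 then (L : Int) + 1 else -1) := by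
        rcases Nat.lt_trichotomy (cs.length - 1 - L) i with hc | hc | hc
        · rw [if_pos hc, if_neg (fun h => absurd h.2 (by omega)),
            if_pos (show cs.length - 1 - L < i + 1 by omega)]
        · have hj : cs.length - i - 1 = L := by omega
          have hpg : PySem.List.pyGetD cs ((cs.length : Int) - i - 1) ' ' ≠ '-' := by
            rw [hcast, PySem.List.pyGetD_natCast, hj]; exact hL
          rw [if_neg (show ¬ cs.length - 1 - L < i by omega), if_pos ⟨hpg, rfl⟩,
            if_pos (show cs.length - 1 - L < i + 1 by omega)]
          omega
        · have hpg : PySem.List.pyGetD cs ((cs.length : Int) - i - 1) ' ' = '-' := by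
            rw [hcast, PySem.List.pyGetD_natCast]
            exact hLmax (cs.length - i - 1) (by omega) (by omega)
          rw [if_neg (show ¬ cs.length - 1 - L < i by omega), if_neg (fun h => absurd hpg h.1),
            if_neg (show ¬ cs.length - 1 - L < i + 1 by omega)]
      simp only [e1, e2]
      by_cases hbr : F < i + 1 ∧ cs.length - 1 - L < i + 1
      · rw [if_pos hbr.1, if_pos hbr.2, if_pos ⟨by omega, by omega⟩]
      · have hne : ¬((if F < i + 1 then (F : Int) else -1) ≠ -1 ∧
            (if cs.length - 1 - L < i + 1 then (L : Int) + 1 else -1) ≠ -1) := by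
          intro hcon
          apply hbr
          constructor
          · by_contra hff; rw [if_neg hff] at hcon; exact hcon.1 rfl
          · by_contra hgg; rw [if_neg hgg] at hcon; exact hcon.2 rfl
        rw [if_neg hne]
        exact ih (i + 1) (by omega) (by omega)
    · have hieq : i = cs.length := by omega
      subst hieq
      rw [fe_loop, dif_neg (by omega), if_pos hFn, if_pos (by omega)]

-- elements of a strictly increasing list are at most its last element
lemma le_getLast_of_pairwise_lt (l : List Nat) (hp : l.Pairwise (· < ·)) (h : l ≠ []) :
    ∀ x ∈ l, x ≤ l.getLast h := by
  induction l with
  | nil => simp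
  | cons a t ih =>
    intro x hx
    rcases List.pairwise_cons.mp hp with ⟨ha, hpt⟩
    cases t with
    | nil =>
      simp at hx
      simp [hx]
    | cons b u =>
      rw [List.getLast_cons (by simp)]
      rcases List.mem_cons.mp hx with rfl | hx'
      · exact le_of_lt (lt_of_lt_of_le (ha b (by simp))
          (ih hpt (by simp) b (by simp)))
      · exact ih hpt (by simp) x hx'

-- ===== VERDICT (by name: the statement is the Claim_ definition above) =====
theorem find_endgap_spec : Claim_equal_find_endgap := by
  intro seq _
  unfold Spec_find_endgap find_endgap find_endgap_alt
  have hidx : (PySem.List.pyRange 0 (PySem.List.len seq.toList) 1).filter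
        (fun i => PySem.List.pyGetD seq.toList i ' ' != '-')
      = ((List.range seq.toList.length).filter
          (fun j => seq.toList.getD j ' ' != '-')).map (Nat.cast) := by
    rw [PySem.List.len_eq, PySem.List.pyRange_zero_natCast, List.filter_map]
    congr 1
    apply List.filter_congr
    intro j hj
    simp [Function.comp, PySem.List.pyGetD_natCast]
  rw [hidx]
  cases hl : (List.range seq.toList.length).filter (fun j => seq.toList.getD j ' ' != '-') with
  | nil =>
    have hall : ∀ j, j < seq.toList.length → seq.toList.getD j ' ' = '-' := by
      intro j hj
      have := List.filter_eq_nil_iff.mp hl j (List.mem_range.mpr hj)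
      simpa using this
    rw [fe_loop_none seq.toList hall seq.toList.length 0 (by omega)]
    rfl
  | cons F t =>
    have hmem : ∀ j, j ∈ F :: t ↔ j < seq.toList.length ∧ seq.toList.getD j ' ' ≠ '-' := by
      intro j
      rw [← hl]
      simp [List.mem_filter, List.mem_range]
    have hp : (F :: t).Pairwise (· < ·) := by
      rw [← hl]; exact List.pairwise_lt_range.filter _
    set L := (F :: t).getLast (by simp) with hLdef
    have hLmem : L ∈ F :: t := List.getLast_mem _
    have hFn := (hmem F).mp (by simp)
    have hLn := (hmem L).mp hLmem
    have hFmin : ∀ j, j < F → seq.toList.getD j ' ' = '-' := by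
      intro j hj
      by_contra hne
      have hjm : j ∈ F :: t := (hmem j).mpr ⟨by omega, hne⟩
      rcases List.mem_cons.mp hjm with rfl | hjt
      · omega
      · have := (List.pairwise_cons.mp hp).1 j hjt
        omega
    have hLmax : ∀ j, L < j → j < seq.toList.length → seq.toList.getD j ' ' = '-' := by
      intro j hLj hjn
      by_contra hne
      have hjm : j ∈ F :: t := (hmem j).mpr ⟨hjn, hne⟩
      have := le_getLast_of_pairwise_lt (F :: t) hp (by simp) j hjm
      omega
    have hloop := fe_loop_found seq.toList F L hFn.1 hLn.1 hFn.2 hLn.2 hFmin hLmax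
      seq.toList.length 0 (by omega) (by omega)
    rw [if_neg (by omega), if_neg (by omega)] at hloop
    have hlast : PySem.List.pyGetD ((F :: t).map (Nat.cast : Nat → Int)) (-1) 0
        = (L : Int) := by
      rw [PySem.List.pyGetD_neg_one _ _ (by simp), List.getLast_map]
    rw [hloop]
    show [(F : Int), (L : Int) + 1]
        = fe_select ((F :: t).map (Nat.cast : Nat → Int))
    show [(F : Int), (L : Int) + 1]
        = [(F : Int), PySem.List.pyGetD ((F :: t).map (Nat.cast : Nat → Int)) (-1) 0 + 1]
    rw [hlast]
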